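-- pv_equiv track=rewrite | github.com/Perfectionist-code/STEPIK_COURSES | Year course EGE 2026/3.6 (П) Домашнее задание 14.10 (№9 Либра)/3_6_6.py | cond_1
-- ===== SOURCE A (Python) =====
-- from collections import Counter
--
-- def cond_1(l: list) -> bool:
--     _counter = Counter(l)
--     cnt_repeat = 0
--     cnt_not_repeat = 0
--     sum_rep = 0
--     sum_n_rep = 0
--     for key, value in _counter.items():
--         if value == 1:
--             cnt_not_repeat += 1
--             sum_n_rep += key
--         if value > 1:
--             cnt_repeat += 1
--             sum_rep += value * key
--     return cnt_repeat > 0 and cnt_not_repeat > 0 and l.count(max(l)) == 1 and sum_n_rep >= 3 * sum_rep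
-- ===== SOURCE B (Python) =====
-- def cond_1(l: list) -> bool:
--     s = sorted(l)
--     has_rep = has_uni = max_unique = False
--     sum_rep = sum_uni = 0
--     i, n = 0, len(s)
--     while i < n:
--         j = i
--         while j < n and s[j] == s[i]:
--             j += 1
--         if j - i == 1:
--             has_uni = True
--             sum_uni += s[i]
--             max_unique = True
--         else:
--             has_rep = True
--             sum_rep += (j - i) * s[i]
--             max_unique = False
--         i = j
--     return has_rep and has_uni and max_unique and sum_uni >= 3 * sum_rep
-- ===== Notes on version B (the rewrite author's own statement) =====
-- stated objective: alternative
-- what changed: Replaces the Counter hash-map build and items() loop by sorting a copy of the list and scanning runs of equal consecutive elements, reading max-uniqueness off the last run instead of calling l.count(max(l)).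
import Mathlib
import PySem

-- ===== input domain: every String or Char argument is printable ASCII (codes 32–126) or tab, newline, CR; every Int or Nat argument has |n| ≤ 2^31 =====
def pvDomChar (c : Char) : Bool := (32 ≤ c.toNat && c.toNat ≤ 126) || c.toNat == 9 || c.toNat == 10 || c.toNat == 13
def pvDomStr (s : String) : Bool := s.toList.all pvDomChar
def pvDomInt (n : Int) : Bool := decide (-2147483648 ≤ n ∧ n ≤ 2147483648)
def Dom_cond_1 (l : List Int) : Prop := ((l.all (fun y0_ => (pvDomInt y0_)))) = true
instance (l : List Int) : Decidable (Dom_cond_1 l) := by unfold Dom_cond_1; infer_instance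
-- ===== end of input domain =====

-- B replaces A's Counter build and items() loop by sorting a copy and scanning runs of equal
-- consecutive elements, reading max-uniqueness off the last run (objective: alternative).

-- ===== PORT A =====
-- step of A's `for key, value in _counter.items()` loop; state = (cnt_repeat, cnt_not_repeat, sum_rep, sum_n_rep)
def cond1Step (st : Int × Int × Int × Int) (kv : Int × Int) : Int × Int × Int × Int :=
  let st1 := if kv.2 == 1 then (st.1, st.2.1 + 1, st.2.2.1, st.2.2.2 + kv.1) else st
  if kv.2 > 1 then (st1.1 + 1, st1.2.1, st1.2.2.1 + kv.2 * kv.1, st1.2.2.2) else st1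

def cond_1 (l : List Int) : Bool :=
  let st := (PySem.Dict.counter l).items.foldl cond1Step (0, 0, 0, 0)
  -- Python's `and` short-circuits, so `max(l)` is only evaluated when the counts are positive
  if st.1 > 0 ∧ st.2.1 > 0 then
    match PySem.List.max? l (fun x => x) with
    | none => false
    | some m => (PySem.List.count l m == 1) && decide (st.2.2.2 ≥ 3 * st.2.2.1)
  else false

-- ===== PORT B =====
-- B's outer `while i < n` loop over runs of the sorted copy; state = (has_rep, has_uni, sum_rep,
-- sum_uni, max_unique); the inner `while s[j] == s[i]: j += 1` advance is the takeWhile/dropWhile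
-- split of the tail, so `j - i = 1 + blk.length`.
def runLoop (st : Bool × Bool × Int × Int × Bool) (s : List Int) : Bool × Bool × Int × Int × Bool :=
  match s with
  | [] => st
  | a :: t =>
      let blk := t.takeWhile (fun x => x == a)
      let rest := t.dropWhile (fun x => x == a)
      if blk.length = 0 then
        runLoop (st.1, true, st.2.2.1, st.2.2.2.1 + a, true) rest
      else
        runLoop (true, st.2.1, st.2.2.1 + ((1 + blk.length : Nat) : Int) * a, st.2.2.2.1, false) rest
termination_by s.length
decreasing_by
  all_goals
    exact Nat.lt_succ_of_le ((List.dropWhile_sublist _).length_le)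

def cond_1_alt (l : List Int) : Bool :=
  let s := PySem.List.sorted l (fun x => x) false
  let st := runLoop (false, false, 0, 0, false) s
  st.1 && st.2.1 && st.2.2.2.2 && decide (st.2.2.2.1 ≥ 3 * st.2.2.1)

-- ===== PRECONDITION & SPEC =====
def Spec_cond_1 (l : List Int) (out : Bool) : Prop := out = cond_1_alt l
instance (l : List Int) (out : Bool) : Decidable (Spec_cond_1 l out) := by unfold Spec_cond_1; infer_instance

-- ===== CLAIM (what is proved, stated in full; the proofs are below) =====
def Claim_equal_cond_1 : Prop := ∀ (l : List Int), Dom_cond_1 l → Spec_cond_1 l (cond_1 l)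

-- ===== LEMMAS AND PROOFS =====

-- common reference form: both programs equal this filter-based expression
def canon (l : List Int) : Bool :=
  !(l.filter (fun x => !(l.count x == 1))).isEmpty &&
  !(l.filter (fun x => l.count x == 1)).isEmpty &&
  (match PySem.List.max? l (fun x => x) with
   | none => false
   | some m => l.count m == 1) &&
  decide ((l.filter (fun x => l.count x == 1)).sum ≥ 3 * (l.filter (fun x => !(l.count x == 1))).sum)

-- ---------- A-side: cond_1 l = canon l ----------

-- characterisation of A's accumulation loop
theorem cond1_fold_char (ys : List (Int × Int)) (st : Int × Int × Int × Int) :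
    ys.foldl cond1Step st =
      (st.1 + (ys.countP (fun kv => decide (1 < kv.2)) : Int),
       st.2.1 + (ys.countP (fun kv => kv.2 == 1) : Int),
       st.2.2.1 + (ys.map (fun kv => if 1 < kv.2 then kv.2 * kv.1 else 0)).sum,
       st.2.2.2 + (ys.map (fun kv => if kv.2 == 1 then kv.1 else 0)).sum) := by
  induction ys generalizing st with
  | nil => simp
  | cons kv t ih =>
    simp only [List.foldl_cons, ih, List.countP_cons, List.map_cons, List.sum_cons]
    unfold cond1Step
    by_cases h1 : kv.2 = 1
    · simp [h1]
      constructor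
      · omega
      · ring
    · by_cases h2 : 1 < kv.2
      · simp [h1, h2]
        exact ⟨by omega, by ring⟩
      · simp [h1, h2]

-- list-sum over all occurrences equals count-weighted sum over the distinct elements
theorem sum_map_eq_sum_dedup (l : List Int) (f : Int → Int) :
    (l.map f).sum = ((PySem.Set.ofList l).map (fun k => (List.count k l : Int) * f k)).sum := by
  have hfs : (PySem.Set.ofList l : List Int).toFinset = l.toFinset := by
    ext x
    simp [PySem.Set.mem_ofList]
  calc (l.map f).sum = ∑ m ∈ l.toFinset, List.count m l • f m := Finset.sum_list_map_count l f
    _ = ((PySem.Set.ofList l).map (fun k => List.count k l • f k)).sum := by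
        rw [← hfs, List.sum_toFinset _ (PySem.Set.nodup_ofList l)]
    _ = _ := by
        exact congrArg List.sum
          (List.map_congr_left (fun k _ => nsmul_eq_mul (List.count k l) (f k)))

theorem filter_sum_eq (l : List Int) (p : Int → Bool) :
    (l.filter p).sum = (l.map (fun x => if p x then x else 0)).sum := by
  induction l with
  | nil => simp
  | cons a t ih =>
    by_cases h : p a <;> simp [h, ih]

-- positivity of the per-key count matches non-emptiness of the per-occurrence filter
theorem countP_S_pos (l : List Int) (p : Int → Bool) (q : Int → Bool)
    (hq : ∀ x ∈ l, (q x = true ↔ p x = true)) :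
    0 < List.countP p (PySem.Set.ofList l) ↔ ¬ l.filter q = [] := by
  rw [List.countP_pos_iff]
  constructor
  · rintro ⟨k, hk, hp⟩ hnil
    have hkl := (PySem.Set.mem_ofList l k).mp hk
    rw [List.filter_eq_nil_iff] at hnil
    exact hnil k hkl ((hq k hkl).mpr hp)
  · intro hne
    rcases List.exists_mem_of_ne_nil _ hne with ⟨x, hx⟩
    rcases List.mem_filter.mp hx with ⟨hxl, hqx⟩
    exact ⟨x, (PySem.Set.mem_ofList l x).mpr hxl, (hq x hxl).mp hqx⟩

-- A's sum over keys with repeats equals the sum over repeated occurrences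
theorem repeats_sum (l : List Int) :
    ((PySem.Set.ofList l).map
      (fun k => if 1 < (List.count k l : Int) then (List.count k l : Int) * k else 0)).sum
      = (l.filter (fun x => !(List.count x l == 1))).sum := by
  rw [filter_sum_eq l, sum_map_eq_sum_dedup l]
  refine congrArg List.sum (List.map_congr_left ?_)
  intro k hk
  have hpos : 0 < List.count k l := List.count_pos_iff.mpr ((PySem.Set.mem_ofList l k).mp hk)
  by_cases h : List.count k l = 1
  · simp [h]
  · have h2 : 1 < List.count k l := by omega
    have h2' : (1 : Int) < (List.count k l : Int) := by exact_mod_cast h2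
    simp [h, h2']

-- A's sum over unique keys equals the sum over unique occurrences
theorem uniques_sum (l : List Int) :
    ((PySem.Set.ofList l).map
      (fun k => if ((List.count k l : Int) == 1) then k else 0)).sum
      = (l.filter (fun x => (List.count x l == 1))).sum := by
  rw [filter_sum_eq l, sum_map_eq_sum_dedup l]
  refine congrArg List.sum (List.map_congr_left ?_)
  intro k hk
  by_cases h : List.count k l = 1
  · simp [h]
  · have h' : ¬ ((List.count k l : Int) = 1) := by exact_mod_cast h
    simp [h, h']

theorem cond1_eq_canon (l : List Int) : cond_1 l = canon l := by
  simp only [cond_1, canon, PySem.Dict.items_counter, cond1_fold_char,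
    List.countP_map, List.map_map, zero_add, Function.comp_def, PySem.List.count_eq]
  by_cases h1 : l.filter (fun x => !(List.count x l == 1)) = []
  · -- no repeated element: both sides are false
    simp [h1]
    intro x hx hlt
    exfalso
    have := List.filter_eq_nil_iff.mp h1 x hx
    simp at this
    omega
  · by_cases h2 : l.filter (fun x => (List.count x l == 1)) = []
    · -- no unique element: both sides are false
      have hz : List.countP (fun k => ((List.count k l : Int) == 1)) (PySem.Set.ofList l) = 0 := by
        rw [List.countP_eq_zero]
        intro k hk
        have hkl := (PySem.Set.mem_ofList l k).mp hk
        have := List.filter_eq_nil_iff.mp h2 k hkl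
        simp at this ⊢
        omega
      simp [h2, hz]
    · have hA1 : 0 < List.countP (fun k => decide (1 < (List.count k l : Int))) (PySem.Set.ofList l) := by
        refine (countP_S_pos l _ _ ?_).mpr h1
        intro x hx
        have := List.count_pos_iff.mpr hx
        simp
        omega
      have hA2 : 0 < List.countP (fun k => ((List.count k l : Int) == 1)) (PySem.Set.ofList l) := by
        refine (countP_S_pos l _ _ ?_).mpr h2
        intro x hx
        simp
      have hA1' : (0 : Int) < (List.countP (fun k => decide (1 < (List.count k l : Int))) (PySem.Set.ofList l) : Int) := by
        exact_mod_cast hA1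
      have hA2' : (0 : Int) < (List.countP (fun k => ((List.count k l : Int) == 1)) (PySem.Set.ofList l) : Int) := by
        exact_mod_cast hA2
      rw [if_pos ⟨hA1', hA2'⟩]
      have hb1 : (!(l.filter (fun x => !(List.count x l == 1))).isEmpty) = true := by
        simp [h1]
      have hb2 : (!(l.filter (fun x => (List.count x l == 1))).isEmpty) = true := by
        simp [h2]
      rw [hb1, hb2]
      cases hmax : PySem.List.max? l (fun x => x) with
      | none => rfl
      | some m =>
        simp only [repeats_sum, uniques_sum, Bool.true_and]
  -- ---------- B-side ----------

-- every element of the dropped suffix is strictly greater than the run's value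
theorem dropWhile_gt (a : Int) (t : List Int) (hp : t.Pairwise (· ≤ ·)) (ha : ∀ x ∈ t, a ≤ x) :
    ∀ x ∈ t.dropWhile (fun x => x == a), a < x := by
  induction t with
  | nil => simp
  | cons b r ih =>
    by_cases hb : b = a
    · subst hb
      simp only [List.dropWhile_cons, BEq.rfl]
      exact ih hp.of_cons (fun x hx => ha x (List.mem_cons_of_mem _ hx))
    · have hba : (b == a) = false := by simp [hb]
      simp only [List.dropWhile_cons, hba]
      intro x hx
      rcases List.mem_cons.mp hx with rfl | hxr
      · exact lt_of_le_of_ne (ha x (List.mem_cons_self)) (Ne.symm hb)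
      · exact lt_of_lt_of_le
          (lt_of_le_of_ne (ha b List.mem_cons_self) (Ne.symm hb))
          (List.rel_of_pairwise_cons hp hxr)

theorem sum_all_eq (L : List Int) (a : Int) (h : ∀ x ∈ L, x = a) :
    L.sum = (L.length : Int) * a := by
  rw [List.eq_replicate_of_mem h, List.sum_replicate, List.length_replicate]
  simp

theorem getLast?_all_eq (a : Int) (blk : List Int) (h : ∀ x ∈ blk, x = a) :
    (a :: blk).getLast? = some a := by
  induction blk with
  | nil => rfl
  | cons b r ih =>
    have hb : b = a := h b List.mem_cons_self
    subst hb
    rw [List.getLast?_cons_cons]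
    exact ih (fun x hx => h x (List.mem_cons_of_mem _ hx))

theorem pairwise_getLast_max (s : List Int) (hp : s.Pairwise (· ≤ ·)) (m : Int)
    (hm : s.getLast? = some m) : ∀ x ∈ s, x ≤ m := by
  induction s with
  | nil => simp
  | cons a t ih =>
    cases t with
    | nil =>
      simp at hm
      subst hm
      simp
    | cons b r =>
      rw [List.getLast?_cons_cons] at hm
      intro x hx
      rcases List.mem_cons.mp hx with rfl | hxt
      · exact le_trans (List.rel_of_pairwise_cons hp List.mem_cons_self)
          (ih hp.of_cons hm b List.mem_cons_self)
      · exact ih hp.of_cons hm x hxt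

-- invariant of B's run-scanning loop over a sorted list
theorem runLoop_char : ∀ (n : Nat) (s : List Int), s.length ≤ n → s.Pairwise (· ≤ ·) →
    ∀ st : Bool × Bool × Int × Int × Bool,
    runLoop st s =
      (st.1 || !(s.filter (fun x => !(s.count x == 1))).isEmpty,
       st.2.1 || !(s.filter (fun x => s.count x == 1)).isEmpty,
       st.2.2.1 + (s.filter (fun x => !(s.count x == 1))).sum,
       st.2.2.2.1 + (s.filter (fun x => s.count x == 1)).sum,
       match s.getLast? with | none => st.2.2.2.2 | some m => (s.count m == 1)) := by
  intro n
  induction n with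
  | zero =>
    intro s hs _ st
    have : s = [] := List.length_eq_zero_iff.mp (Nat.le_zero.mp hs)
    subst this
    simp [runLoop]
  | succ n ih =>
    intro s hs hp st
    match s with
    | [] => simp [runLoop]
    | a :: t =>
      have htsplit : t.takeWhile (fun x => x == a) ++ t.dropWhile (fun x => x == a) = t :=
        List.takeWhile_append_dropWhile
      generalize hB : t.takeWhile (fun x => x == a) = blk at *
      generalize hR : t.dropWhile (fun x => x == a) = rest at *
      have hblk : ∀ x ∈ blk, x = a := by
        intro x hx
        rw [← hB] at hx
        exact eq_of_beq (List.mem_takeWhile_imp (p := fun x => x == a) hx)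
      have hta : ∀ x ∈ t, a ≤ x := fun x hx => List.rel_of_pairwise_cons hp hx
      have hrest_gt : ∀ x ∈ rest, a < x := by
        rw [← hR]; exact dropWhile_gt a t hp.of_cons hta
      have hrest_pw : rest.Pairwise (· ≤ ·) := by
        rw [← hR]; exact List.Pairwise.sublist (List.dropWhile_sublist _) hp.of_cons
      have hlen : rest.length ≤ n := by
        have h1 : rest.length ≤ t.length := by
          rw [← hR]; exact (List.dropWhile_sublist _).length_le
        simp only [List.length_cons] at hs
        omega
      have hanr : a ∉ rest := fun h => absurd (hrest_gt a h) (lt_irrefl a)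
      have hcnt_a : (a :: t).count a = 1 + blk.length := by
        rw [List.count_cons_self, ← htsplit, List.count_append,
          List.count_eq_zero.mpr hanr, List.count_eq_length.mpr (fun b hb => (hblk b hb).symm)]
        omega
      have hcnt_rest : ∀ x ∈ rest, (a :: t).count x = rest.count x := by
        intro x hx
        have hxa : x ≠ a := fun h => absurd (h ▸ hrest_gt x hx) (lt_irrefl a)
        have hxblk : x ∉ blk := fun h => hxa (hblk x h)
        rw [← htsplit]
        simp [List.count_cons, List.count_append, List.count_eq_zero.mpr hxblk]
        exact fun h => hxa h.symm
      -- rewrite the filters over the rest to rest-local counts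
      have hfilt_rest : ∀ q : Nat → Bool,
          rest.filter (fun x => q ((a :: t).count x)) = rest.filter (fun x => q (rest.count x)) :=
        fun q => List.filter_congr (fun x hx => by rw [hcnt_rest x hx])
      have hsplitf : ∀ p : Int → Bool,
          (a :: t).filter p = (a :: blk).filter p ++ rest.filter p := by
        intro p
        rw [← htsplit]
        by_cases hpa : p a
        · simp [hpa, List.filter_append]
        · simp [hpa, List.filter_append]
      rw [runLoop]
      rw [hB, hR]
      by_cases hb0 : blk.length = 0
      · -- run of length 1: a unique element
        have hbnil : blk = [] := List.length_eq_zero_iff.mp hb0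
        subst hbnil
        rw [if_pos List.length_nil, ih rest hlen hrest_pw]
        have hca : (a :: t).count a = 1 := by omega
        have hf1 : (a :: t).filter (fun x => !((a :: t).count x == 1)) =
            rest.filter (fun x => !(rest.count x == 1)) := by
          rw [hsplitf, ← hfilt_rest (fun c => !(c == 1))]
          simp [hca]
        have hf2 : (a :: t).filter (fun x => (a :: t).count x == 1) =
            a :: rest.filter (fun x => rest.count x == 1) := by
          rw [hsplitf, ← hfilt_rest (fun c => (c == 1))]
          simp [hca]
        rw [hf1, hf2]
        simp only [List.isEmpty_cons, Bool.not_false, Bool.or_true, List.sum_cons]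
        refine Prod.ext rfl (Prod.ext rfl (Prod.ext rfl (Prod.ext (by ring_nf) ?_)))
        simp only [← htsplit, List.nil_append]
        cases rest with
        | nil => simp
        | cons b r =>
          rw [List.getLast?_cons_cons]
          cases hgl : (b :: r).getLast? with
          | none => simp at hgl
          | some m =>
            have hm : m ∈ b :: r := by
              rcases List.getLast?_eq_some_iff.mp hgl with ⟨l', hl'⟩
              rw [hl']
              exact List.mem_concat_self
            have hcm := hcnt_rest m hm
            rw [← htsplit, List.nil_append] at hcm
            show (List.count m (b :: r) == 1) = (List.count m (a :: b :: r) == 1)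
            rw [hcm]
      · -- run of length ≥ 2: a repeated element
        rw [if_neg hb0, ih rest hlen hrest_pw]
        have hca : ((a :: t).count a == 1) = false := by
          rw [hcnt_a, beq_eq_false_iff_ne]
          omega
        have hf1 : (a :: t).filter (fun x => !((a :: t).count x == 1)) =
            (a :: blk) ++ rest.filter (fun x => !(rest.count x == 1)) := by
          rw [hsplitf, ← hfilt_rest (fun c => !(c == 1))]
          congr 1
          refine List.filter_eq_self.mpr (fun x hx => ?_)
          have : (a :: t).count x = (a :: t).count a := by
            rcases List.mem_cons.mp hx with rfl | hxb
            · rfl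
            · rw [hblk x hxb]
          rw [this, hca]
          rfl
        have hf2 : (a :: t).filter (fun x => (a :: t).count x == 1) =
            rest.filter (fun x => rest.count x == 1) := by
          rw [hsplitf, ← hfilt_rest (fun c => (c == 1))]
          have : (a :: blk).filter (fun x => (a :: t).count x == 1) = [] := by
            refine List.filter_eq_nil_iff.mpr (fun x hx => ?_)
            have : (a :: t).count x = (a :: t).count a := by
              rcases List.mem_cons.mp hx with rfl | hxb
              · rfl
              · rw [hblk x hxb]
            rw [this, hca]
            simp
          rw [this, List.nil_append]
        rw [hf1, hf2]
        have hsum1 : ((a :: blk) ++ rest.filter (fun x => !(rest.count x == 1))).sum =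
            ((1 + blk.length : Nat) : Int) * a +
              (rest.filter (fun x => !(rest.count x == 1))).sum := by
          rw [List.sum_append, sum_all_eq (a :: blk) a (fun x hx => by
            rcases List.mem_cons.mp hx with rfl | hxb
            · rfl
            · exact hblk x hxb)]
          simp only [List.length_cons]
          push_cast
          ring
        refine Prod.ext ?_ (Prod.ext rfl (Prod.ext ?_ (Prod.ext rfl ?_)))
        · simp
        · rw [hsum1]; ring
        · simp only [← htsplit]
          have hbne : blk ≠ [] := fun h => hb0 (h ▸ rfl)
          cases hrnil : rest with
          | nil =>
            simp only [List.append_nil]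
            have hcnt' := hcnt_a
            rw [← htsplit, hrnil, List.append_nil] at hcnt'
            rw [getLast?_all_eq a blk hblk]
            show false = (List.count a (a :: blk) == 1)
            rw [hcnt']
            simp
            omega
          | cons b r =>
            have h2 : (a :: (blk ++ b :: r)).getLast? = (b :: r).getLast? := by
              rw [← List.cons_append]
              exact List.getLast?_append_of_ne_nil _ (List.cons_ne_nil b r)
            rw [h2]
            cases hgl : (b :: r).getLast? with
            | none => simp at hgl
            | some m =>
              have hm : m ∈ b :: r := by
                rcases List.getLast?_eq_some_iff.mp hgl with ⟨l', hl'⟩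
                rw [hl']
                exact List.mem_concat_self
              have hcm := hcnt_rest m (hrnil.symm ▸ hm)
              rw [← htsplit, hrnil] at hcm
              show (List.count m (b :: r) == 1) = (List.count m (a :: (blk ++ b :: r)) == 1)
              rw [hcm]

theorem perm_isEmpty {α : Type} {l₁ l₂ : List α} (h : l₁.Perm l₂) :
    l₁.isEmpty = l₂.isEmpty := by
  rw [Bool.eq_iff_iff, List.isEmpty_iff, List.isEmpty_iff]
  constructor
  · intro e
    rw [e] at h
    exact h.symm.eq_nil
  · intro e
    rw [e] at h
    exact h.eq_nil

theorem cond1_alt_eq_canon (l : List Int) : cond_1_alt l = canon l := by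
  by_cases hl : l = []
  · subst hl
    have h0 : PySem.List.sorted ([] : List Int) (fun x => x) false = [] :=
      List.Perm.eq_nil (PySem.List.sorted_perm [] (fun x => x) false)
    simp only [cond_1_alt, canon, h0]
    rw [runLoop]
    simp
  · simp only [cond_1_alt, canon]
    have hperm : (PySem.List.sorted l (fun x => x) false).Perm l :=
      PySem.List.sorted_perm l (fun x => x) false
    have hpw : (PySem.List.sorted l (fun x => x) false).Pairwise (· ≤ ·) := by
      simpa using PySem.List.sorted_pairwise (xs := l) (key := fun x => x)
    have hcnt : ∀ x : Int, (PySem.List.sorted l (fun x => x) false).count x = l.count x :=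
      fun x => hperm.count_eq x
    rw [runLoop_char (PySem.List.sorted l (fun x => x) false).length _ le_rfl hpw]
    have hpred1 : (fun x : Int => !((PySem.List.sorted l (fun x => x) false).count x == 1)) =
        (fun x => !(l.count x == 1)) := funext fun x => by rw [hcnt]
    have hpred2 : (fun x : Int => ((PySem.List.sorted l (fun x => x) false).count x == 1)) =
        (fun x => (l.count x == 1)) := funext fun x => by rw [hcnt]
    rw [hpred1, hpred2]
    have hperm1 := hperm.filter (fun x => !(l.count x == 1))
    have hperm2 := hperm.filter (fun x => (l.count x == 1))
    have hsne : PySem.List.sorted l (fun x => x) false ≠ [] := by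
      intro h
      rw [h] at hperm
      exact hl hperm.symm.eq_nil
    obtain ⟨m', hm'⟩ : ∃ m', (PySem.List.sorted l (fun x => x) false).getLast? = some m' := by
      cases h : (PySem.List.sorted l (fun x => x) false).getLast? with
      | none => exact absurd (List.getLast?_eq_none_iff.mp h) hsne
      | some m' => exact ⟨m', rfl⟩
    obtain ⟨m, hmax⟩ : ∃ m, PySem.List.max? l (fun x => x) = some m := by
      cases l with
      | nil => exact absurd rfl hl
      | cons x t => exact ⟨List.foldl max x t, PySem.List.max?_id_cons x t⟩
    have hm'mem : m' ∈ l := by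
      rcases List.getLast?_eq_some_iff.mp hm' with ⟨l', hl'⟩
      exact hperm.mem_iff.mp (hl' ▸ List.mem_concat_self)
    have hmmem : m ∈ PySem.List.sorted l (fun x => x) false :=
      hperm.mem_iff.mpr (PySem.List.max?_mem hmax)
    have hmeq : m = m' := by
      refine le_antisymm ?_ ?_
      · exact pairwise_getLast_max _ hpw m' hm' m hmmem
      · simpa using PySem.List.max?_isMax hmax m' hm'mem
    rw [hm', hmax, perm_isEmpty hperm1, perm_isEmpty hperm2, hperm1.sum_eq, hperm2.sum_eq]
    simp only [Bool.false_or, zero_add]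
    rw [hmeq]

-- ===== VERDICT (by name: the statement is the Claim_ definition above) =====
theorem cond_1_spec : Claim_equal_cond_1 := by
  intro l _
  unfold Spec_cond_1
  rw [cond1_eq_canon, cond1_alt_eq_canon]
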